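-- pv_equiv track=rewrite | github.com/zyksir/zyksir.github.io | main.py | binary_check_for_mono_increase
-- ===== SOURCE A (Python) =====
-- def calculate_distance(a, x, n):
--     dist = 0
--     for i in range(n):
--         dist += abs(a[i] - x)
--     return dist
--
-- def binary_check_for_mono_increase(left, right, a, n, d):
--     ans = left
--     while left <= right:
--         mid = (left + right) // 2
--         if calculate_distance(a, mid, n) * 2 <= d:
--             ans = max(ans, mid)
--             left = mid + 1
--         else:
--             right = mid - 1
--     return ans
-- ===== SOURCE B (Python) =====
-- def binary_check_for_mono_increase(left, right, a, n, d):
--     # Preprocess: sort the first n elements and take prefix sums, so each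
--     # distance query in the binary search costs O(log n) instead of O(n).
--     m = n if n > 0 else 0
--     vals = sorted(a[:m])
--     pref = [0]
--     s = 0
--     for v in vals:
--         s += v
--         pref.append(s)
--     total = s
--
--     def count_le(x):
--         lo, hi = 0, len(vals)
--         while lo < hi:
--             md = (lo + hi) // 2
--             if vals[md] <= x:
--                 lo = md + 1
--             else:
--                 hi = md
--         return lo
--
--     def dist(x):
--         k = count_le(x)
--         return (k * x - pref[k]) + ((total - pref[k]) - (len(vals) - k) * x)
--
--     ans = left
--     while left <= right:
--         mid = (left + right) // 2
--         if dist(mid) * 2 <= d: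
--             ans = max(ans, mid)
--             left = mid + 1
--         else:
--             right = mid - 1
--     return ans
-- ===== Notes on version B (the rewrite author's own statement) =====
-- stated objective: alternative
-- what changed: Each binary-search step of A recomputes the distance with an O(n) scan; B sorts the first n elements once, takes prefix sums, and answers each distance query with an O(log n) bisection on the sorted values (intended as asymptotically faster, O(n log n + log R log n) vs O(n log R); a timing run could not confirm a consistent 1.5x speed-up, so no speed is claimed).
import Mathlib
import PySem

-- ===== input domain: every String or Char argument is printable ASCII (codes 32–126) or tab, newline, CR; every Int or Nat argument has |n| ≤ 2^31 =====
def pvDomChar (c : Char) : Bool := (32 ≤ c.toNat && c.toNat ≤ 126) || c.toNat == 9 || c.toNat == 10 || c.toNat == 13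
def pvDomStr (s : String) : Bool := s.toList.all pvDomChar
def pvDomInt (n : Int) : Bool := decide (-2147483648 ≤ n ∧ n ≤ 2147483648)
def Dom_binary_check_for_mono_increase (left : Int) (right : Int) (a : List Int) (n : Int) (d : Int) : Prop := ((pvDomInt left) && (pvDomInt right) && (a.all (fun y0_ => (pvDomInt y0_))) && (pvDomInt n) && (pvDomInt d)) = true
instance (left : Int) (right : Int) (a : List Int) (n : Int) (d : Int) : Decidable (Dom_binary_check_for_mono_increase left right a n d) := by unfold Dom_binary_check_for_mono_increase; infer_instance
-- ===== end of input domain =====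

-- B replaces the per-step O(n) distance scan by a one-time sort + prefix sums and a per-step bisection (a different algorithm; no measured speed claim).


-- ===== PORT A =====
def calculate_distance (a : List Int) (x : Int) (n : Int) : Int :=
  (PySem.List.pyRange 0 n 1).foldl (fun dist i => dist + |PySem.List.pyGetD a i 0 - x|) 0

def bcLoopA (a : List Int) (n d : Int) (l r ans : Int) : Int :=
  if _h : l ≤ r then
    let mid := PySem.Int.floordiv (l + r) 2
    if calculate_distance a mid n * 2 ≤ d then
      bcLoopA a n d (mid + 1) r (max ans mid)
    else
      bcLoopA a n d l (mid - 1) ans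
  else ans
termination_by (r + 1 - l).toNat
decreasing_by
  · have := PySem.Int.floordiv_two_mid_bounds (lo := l) (hi := r) _h
    omega
  · have := PySem.Int.floordiv_two_mid_bounds (lo := l) (hi := r) _h
    omega

def binary_check_for_mono_increase (left : Int) (right : Int) (a : List Int) (n : Int) (d : Int) : Int :=
  bcLoopA a n d left right left


-- ===== PORT B =====
def countLeLoop (vals : List Int) (x : Int) (lo hi : Int) : Int :=
  if _h : lo < hi then
    let md := PySem.Int.floordiv (lo + hi) 2
    if PySem.List.pyGetD vals md 0 ≤ x then
      countLeLoop vals x (md + 1) hi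
    else
      countLeLoop vals x lo md
  else lo
termination_by (hi - lo).toNat
decreasing_by
  · have := PySem.Int.floordiv_two_mid_bounds (lo := lo) (hi := hi) (le_of_lt _h)
    omega
  · have h2 := (PySem.Int.floordiv_lt_iff_lt_mul (a := lo + hi) (b := 2) (q := hi) (by omega)).mpr (by omega)
    have := PySem.Int.floordiv_two_mid_bounds (lo := lo) (hi := hi) (le_of_lt _h)
    omega

def countLe (vals : List Int) (x : Int) : Int :=
  countLeLoop vals x 0 (vals.length : Int)

def distB (vals pref : List Int) (total : Int) (x : Int) : Int :=
  let k := countLe vals x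
  (k * x - PySem.List.pyGetD pref k 0) +
    ((total - PySem.List.pyGetD pref k 0) - ((vals.length : Int) - k) * x)

def buildPref (vals : List Int) : List Int × Int :=
  vals.foldl (fun ps v => (ps.1 ++ [ps.2 + v], ps.2 + v)) ([0], 0)

def bcLoopB (vals pref : List Int) (total d : Int) (l r ans : Int) : Int :=
  if _h : l ≤ r then
    let mid := PySem.Int.floordiv (l + r) 2
    if distB vals pref total mid * 2 ≤ d then
      bcLoopB vals pref total d (mid + 1) r (max ans mid)
    else
      bcLoopB vals pref total d l (mid - 1) ans
  else ans
termination_by (r + 1 - l).toNat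
decreasing_by
  · have := PySem.Int.floordiv_two_mid_bounds (lo := l) (hi := r) _h
    omega
  · have := PySem.Int.floordiv_two_mid_bounds (lo := l) (hi := r) _h
    omega

def binary_check_for_mono_increase_alt (left : Int) (right : Int) (a : List Int) (n : Int) (d : Int) : Int :=
  let m : Int := if n > 0 then n else 0
  let vals := PySem.List.sorted (PySem.List.slice a none (some m)) (fun v => v) false
  let ps := buildPref vals
  bcLoopB vals ps.1 ps.2 d left right left


-- ===== PRECONDITION & SPEC =====
-- Pre_ excludes exactly the inputs on which A raises IndexError: n larger than len(a) while the search loop runs at least once (left ≤ right).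
def Pre_binary_check_for_mono_increase (left : Int) (right : Int) (a : List Int) (n : Int) (d : Int) : Prop :=
  n ≤ (a.length : Int) ∨ right < left
instance (left : Int) (right : Int) (a : List Int) (n : Int) (d : Int) : Decidable (Pre_binary_check_for_mono_increase left right a n d) := by unfold Pre_binary_check_for_mono_increase; infer_instance

def pvWitness_binary_check_for_mono_increase : Int × Int × List Int × Int × Int := (0, 5, [1, 2, 4], 3, 6)

def Spec_binary_check_for_mono_increase (left : Int) (right : Int) (a : List Int) (n : Int) (d : Int) (out : Int) : Prop := out = binary_check_for_mono_increase_alt left right a n d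
instance (left : Int) (right : Int) (a : List Int) (n : Int) (d : Int) (out : Int) : Decidable (Spec_binary_check_for_mono_increase left right a n d out) := by unfold Spec_binary_check_for_mono_increase; infer_instance

-- ===== CLAIM (what is proved, stated in full; the proofs are below) =====
def Claim_equal_binary_check_for_mono_increase : Prop := ∀ (left : Int) (right : Int) (a : List Int) (n : Int) (d : Int), Dom_binary_check_for_mono_increase left right a n d → Pre_binary_check_for_mono_increase left right a n d → Spec_binary_check_for_mono_increase left right a n d (binary_check_for_mono_increase left right a n d)

-- ===== LEMMAS AND PROOFS =====
theorem bcLoopA_stop (a : List Int) (n d l r ans : Int) (h : r < l) :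
    bcLoopA a n d l r ans = ans := by
  rw [bcLoopA, dif_neg (by omega)]

theorem bcLoopB_stop (vals pref : List Int) (total d l r ans : Int) (h : r < l) :
    bcLoopB vals pref total d l r ans = ans := by
  rw [bcLoopB, dif_neg (by omega)]

theorem stopA (left right : Int) (a : List Int) (n d : Int) (h : right < left) :
    binary_check_for_mono_increase left right a n d = left := by
  unfold binary_check_for_mono_increase
  exact bcLoopA_stop a n d left right left h

theorem stopB (left right : Int) (a : List Int) (n d : Int) (h : right < left) :
    binary_check_for_mono_increase_alt left right a n d = left := by
  unfold binary_check_for_mono_increase_alt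
  exact bcLoopB_stop _ _ _ d left right left h

theorem calc_dist_eq_sum (a : List Int) (x n : Int) (hn : n ≤ (a.length : Int)) :
    calculate_distance a x n = ((a.take n.toNat).map (fun v => |v - x|)).sum := by
  unfold calculate_distance
  by_cases hp : n ≤ 0
  · rw [PySem.List.pyRange_one_eq_nil hp]
    have : n.toNat = 0 := by omega
    simp [this]
  · have hlen : ((a.take n.toNat).length : Int) = n := by
      simp [List.length_take]; omega
    have hlen' : PySem.List.len (a.take n.toNat) = n := by
      simpa [PySem.List.len] using hlen
    rw [show PySem.List.pyRange 0 n 1 = PySem.List.pyRange 0 (PySem.List.len (a.take n.toNat)) 1 by rw [hlen']]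
    rw [PySem.List.foldl_congr_mem _ _ (fun dist i => dist + |PySem.List.pyGetD (a.take n.toNat) i 0 - x|) _
      (by
        intro acc i hi
        rw [PySem.List.mem_pyRange_one] at hi
        rw [hlen'] at hi
        have e1 := PySem.List.pyGetD_eq_getElem a (i := i) 0 hi.1 (by omega)
        have e2 := PySem.List.pyGetD_eq_getElem (a.take n.toNat) (i := i) 0 hi.1 (by
          rw [hlen]; omega)
        simp only [e1, e2, List.getElem_take])]
    rw [PySem.List.foldl_pyRange_pyGetD (a.take n.toNat) 0 (fun acc v => acc + |v - x|) 0 (a := 0) (by omega)]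
    simp [PySem.List.foldl_add]
theorem buildPref_eq (vals : List Int) :
    buildPref vals = ((List.range (vals.length + 1)).map (fun j => (vals.take j).sum), vals.sum) := by
  induction vals using List.reverseRecOn with
  | nil => rfl
  | append_singleton ys v ih =>
    unfold buildPref at ih ⊢
    rw [List.foldl_append, ih]
    simp only [List.foldl_cons, List.foldl_nil]
    have h1 : (List.range ((ys ++ [v]).length + 1)).map (fun j => ((ys ++ [v]).take j).sum)
        = (List.range (ys.length + 1)).map (fun j => (ys.take j).sum) ++ [ys.sum + v] := by
      rw [List.length_append, List.length_singleton, List.range_succ, List.map_append]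
      congr 1
      · apply List.map_congr_left
        intro j hj
        rw [List.mem_range] at hj
        rw [List.take_append_of_le_length (by omega)]
      · simp [List.take_of_length_le]
    rw [h1]
    simp
theorem countLeLoop_char (vals : List Int) (x : Int)
    (hs : vals.Pairwise (· ≤ ·)) :
    ∀ (lo hi : Int), 0 ≤ lo → lo ≤ hi → hi ≤ (vals.length : Int) →
    (∀ i : Nat, (i : Int) < lo → ∀ h : i < vals.length, vals[i] ≤ x) →
    (∀ i : Nat, hi ≤ (i : Int) → ∀ h : i < vals.length, x < vals[i]) →
    0 ≤ countLeLoop vals x lo hi ∧ countLeLoop vals x lo hi ≤ (vals.length : Int) ∧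
    (∀ i : Nat, (i : Int) < countLeLoop vals x lo hi → ∀ h : i < vals.length, vals[i] ≤ x) ∧
    (∀ i : Nat, countLeLoop vals x lo hi ≤ (i : Int) → ∀ h : i < vals.length, x < vals[i]) := by
  rw [List.pairwise_iff_getElem] at hs
  intro lo hi
  induction lo, hi using countLeLoop.induct vals x with
  | case1 lo hi hlt md hle ih =>
    intro h0 hlh hhi hlow hhigh
    have hmb := PySem.Int.floordiv_two_mid_bounds (lo := lo) (hi := hi) (le_of_lt hlt)
    have hmu := (PySem.Int.floordiv_lt_iff_lt_mul (a := lo + hi) (b := 2) (q := hi) (by omega)).mpr (by omega)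
    rw [countLeLoop, dif_pos hlt]
    rw [if_pos (show PySem.List.pyGetD vals (PySem.Int.floordiv (lo + hi) 2) 0 ≤ x from hle)]
    apply ih (by omega) (by omega) (by omega)
    · intro i hi1 hi2
      have hmd : PySem.List.pyGetD vals md 0 = vals[md.toNat] :=
        PySem.List.pyGetD_eq_getElem vals 0 (by omega) (by omega)
      rcases lt_or_eq_of_le (show (i : Int) ≤ md by omega) with hcase | hcase
      · exact le_trans (hs i md.toNat hi2 (by omega) (by omega)) (hmd ▸ hle)
      · have : i = md.toNat := by omega
        subst this
        exact hmd ▸ hle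
    · exact hhigh
  | case2 lo hi hlt md hgt ih =>
    intro h0 hlh hhi hlow hhigh
    have hmb := PySem.Int.floordiv_two_mid_bounds (lo := lo) (hi := hi) (le_of_lt hlt)
    have hmu := (PySem.Int.floordiv_lt_iff_lt_mul (a := lo + hi) (b := 2) (q := hi) (by omega)).mpr (by omega)
    rw [countLeLoop, dif_pos hlt]
    rw [if_neg (show ¬ PySem.List.pyGetD vals (PySem.Int.floordiv (lo + hi) 2) 0 ≤ x from hgt)]
    apply ih (by omega) (by omega) (by omega) hlow
    · intro i hi1 hi2
      push Not at hgt
      have hmd : PySem.List.pyGetD vals md 0 = vals[md.toNat] :=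
        PySem.List.pyGetD_eq_getElem vals 0 (by omega) (by omega)
      rcases lt_or_eq_of_le (show md ≤ (i : Int) by omega) with hcase | hcase
      · exact lt_of_lt_of_le (hmd ▸ hgt) (hs md.toNat i (by omega) hi2 (by omega))
      · have : i = md.toNat := by omega
        subst this
        exact hmd ▸ hgt
  | case3 lo hi hge =>
    intro h0 hlh hhi hlow hhigh
    rw [countLeLoop, dif_neg hge]
    refine ⟨h0, by omega, ?_, ?_⟩
    · exact hlow
    · intro i hi1 hi2
      exact hhigh i (by omega) hi2
theorem sum_map_const_sub (x : Int) (ys : List Int) :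
    (ys.map (fun v => x - v)).sum = (ys.length : Int) * x - ys.sum := by
  induction ys with
  | nil => simp
  | cons y t ih => simp [ih]; ring

theorem sum_map_sub_const (x : Int) (ys : List Int) :
    (ys.map (fun v => v - x)).sum = ys.sum - (ys.length : Int) * x := by
  induction ys with
  | nil => simp
  | cons y t ih => simp [ih]; ring

theorem dist_eq (vals : List Int) (hs : vals.Pairwise (· ≤ ·)) (x : Int) :
    distB vals (buildPref vals).1 (buildPref vals).2 x = (vals.map (fun v => |v - x|)).sum := by
  obtain ⟨hk0, hklen, hle, hgt⟩ := countLeLoop_char vals x hs 0 (vals.length : Int)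
    le_rfl (by omega) le_rfl (by intro i hi1 hi2; omega) (by intro i hi1 hi2; omega)
  set k := countLeLoop vals x 0 (vals.length : Int) with hk
  have hkn : ((k.toNat : Int)) = k := by omega
  have hknle : k.toNat ≤ vals.length := by omega
  have hpref : ∀ j : Nat, j ≤ vals.length →
      PySem.List.pyGetD (buildPref vals).1 (j : Int) 0 = (vals.take j).sum := by
    intro j hj
    rw [buildPref_eq]
    rw [PySem.List.pyGetD_eq_getElem _ _ (by omega) (by simp; omega)]
    simp
  have htotal : (buildPref vals).2 = vals.sum := by rw [buildPref_eq]
  have hsplit : vals.map (fun v => |v - x|)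
      = (vals.take k.toNat).map (fun v => |v - x|) ++ (vals.drop k.toNat).map (fun v => |v - x|) := by
    rw [← List.map_append, List.take_append_drop]
  have htake : (vals.take k.toNat).map (fun v => |v - x|) = (vals.take k.toNat).map (fun v => x - v) := by
    apply List.map_congr_left
    intro v hv
    obtain ⟨i, hi, rfl⟩ := List.mem_iff_getElem.mp hv
    rw [List.getElem_take]
    have hi' : i < vals.length := by simp at hi; omega
    have hiv : (i : Int) < k := by simp at hi; omega
    have := hle i hiv hi'
    rw [abs_of_nonpos (by omega), neg_sub]
  have hdrop : (vals.drop k.toNat).map (fun v => |v - x|) = (vals.drop k.toNat).map (fun v => v - x) := by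
    apply List.map_congr_left
    intro v hv
    obtain ⟨i, hi, rfl⟩ := List.mem_iff_getElem.mp hv
    rw [List.getElem_drop]
    have hi' : k.toNat + i < vals.length := by simp at hi; omega
    have hiv : k ≤ (((k.toNat + i : Nat)) : Int) := by omega
    have := hgt (k.toNat + i) hiv hi'
    rw [abs_of_nonneg (by omega)]
  have hsums : (vals.take k.toNat).sum + (vals.drop k.toNat).sum = vals.sum := by
    rw [← List.sum_append, List.take_append_drop]
  unfold distB countLe
  simp only
  rw [← hk]
  rw [← hkn, hpref k.toNat hknle, htotal]
  rw [hsplit, List.sum_append, htake, hdrop, sum_map_const_sub, sum_map_sub_const]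
  rw [List.length_take, List.length_drop]
  have h1 : (min k.toNat vals.length) = k.toNat := by omega
  rw [h1]
  have h2 : ((vals.length - k.toNat : Nat) : Int) = (vals.length : Int) - k := by omega
  rw [h2, hkn]
  linarith [hsums]
theorem loop_eq (a : List Int) (n d : Int) (vals pref : List Int) (total : Int)
    (hdist : ∀ x, calculate_distance a x n = distB vals pref total x) :
    ∀ l r ans, bcLoopA a n d l r ans = bcLoopB vals pref total d l r ans := by
  intro l r ans
  induction l, r, ans using bcLoopA.induct a n d with
  | case1 l r ans hle mid hcond ih =>
    rw [bcLoopA, bcLoopB, dif_pos hle, dif_pos hle]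
    rw [if_pos (show calculate_distance a (PySem.Int.floordiv (l + r) 2) n * 2 ≤ d from hcond),
        if_pos (show distB vals pref total (PySem.Int.floordiv (l + r) 2) * 2 ≤ d by rw [← hdist]; exact hcond)]
    exact ih
  | case2 l r ans hle mid hcond ih =>
    rw [bcLoopA, bcLoopB, dif_pos hle, dif_pos hle]
    rw [if_neg (show ¬ calculate_distance a (PySem.Int.floordiv (l + r) 2) n * 2 ≤ d from hcond),
        if_neg (show ¬ distB vals pref total (PySem.Int.floordiv (l + r) 2) * 2 ≤ d by rw [← hdist]; exact hcond)]
    exact ih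
  | case3 l r ans hgt =>
    rw [bcLoopA, bcLoopB, dif_neg hgt, dif_neg hgt]

theorem main_thm : ∀ (left right : Int) (a : List Int) (n d : Int),
    n ≤ (a.length : Int) →
    binary_check_for_mono_increase left right a n d = binary_check_for_mono_increase_alt left right a n d := by
  intro left right a n d hn
  unfold binary_check_for_mono_increase binary_check_for_mono_increase_alt
  simp only
  set m : Int := if n > 0 then n else 0 with hm
  have hm0 : 0 ≤ m := by rw [hm]; split <;> omega
  have hmn : m.toNat = n.toNat := by rw [hm]; split <;> omega
  have hslice : PySem.List.slice a none (some m) = a.take n.toNat := by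
    rw [PySem.List.slice_to a hm0, hmn]
  rw [hslice]
  set vals := PySem.List.sorted (a.take n.toNat) (fun v => v) false with hv
  have hperm : vals.Perm (a.take n.toNat) := PySem.List.sorted_perm _ _ _
  have hsorted : vals.Pairwise (· ≤ ·) := by
    have := PySem.List.sorted_pairwise (xs := a.take n.toNat) (key := fun v => v)
    simpa using this
  apply loop_eq
  intro x
  rw [calc_dist_eq_sum a x n hn, dist_eq vals hsorted x]
  exact (List.Perm.sum_eq ((hperm.map _).symm))


-- ===== VERDICT (by name: the statement is the Claim_ definition above) =====
theorem binary_check_for_mono_increase_spec : Claim_equal_binary_check_for_mono_increase := by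
  intro left right a n d _hdom hpre
  unfold Pre_binary_check_for_mono_increase at hpre
  unfold Spec_binary_check_for_mono_increase
  rcases hpre with hn | hlr
  · exact main_thm left right a n d hn
  · rw [stopA left right a n d hlr, stopB left right a n d hlr]
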